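-- pv_equiv track=rewrite | github.com/YQuark/CDU_GYM_RESERVE | core/request_flow.py | pick_card_by_keywords
-- ===== SOURCE A (Python) =====
-- from typing import Any, Dict, List, Optional, Sequence, Tuple
--
-- def pick_card_by_keywords(cards: Sequence[Dict[str, str]], keywords: Sequence[str]) -> Optional[Dict[str, str]]:
--     if not cards:
--         return None
--
--     def score(card: Dict[str, str]) -> int:
--         text = card.get("name", "")
--         for idx, kw in enumerate(keywords or []):
--             if kw and kw in text:
--                 return idx
--         return 999
--
--     return sorted(cards, key=score)[0]
-- ===== SOURCE B (Python) =====
-- def pick_card_by_keywords(cards, keywords):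
--     best = None  # (card, score) with the smallest score seen so far, first wins ties
--     for card in cards:
--         name = card.get("name", "")
--         s = next((i for i, kw in enumerate(keywords or []) if kw and kw in name), 999)
--         if best is None or s < best[1]:
--             best = (card, s)
--     return best[0] if best is not None else None
-- ===== Notes on version B (the rewrite author's own statement) =====
-- stated objective: alternative
-- what changed: Replaces the sort-by-score-then-take-first with a single running-minimum pass that keeps the first card attaining the smallest score, computing each score with an inline generator instead of a helper function.
import Mathlib
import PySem

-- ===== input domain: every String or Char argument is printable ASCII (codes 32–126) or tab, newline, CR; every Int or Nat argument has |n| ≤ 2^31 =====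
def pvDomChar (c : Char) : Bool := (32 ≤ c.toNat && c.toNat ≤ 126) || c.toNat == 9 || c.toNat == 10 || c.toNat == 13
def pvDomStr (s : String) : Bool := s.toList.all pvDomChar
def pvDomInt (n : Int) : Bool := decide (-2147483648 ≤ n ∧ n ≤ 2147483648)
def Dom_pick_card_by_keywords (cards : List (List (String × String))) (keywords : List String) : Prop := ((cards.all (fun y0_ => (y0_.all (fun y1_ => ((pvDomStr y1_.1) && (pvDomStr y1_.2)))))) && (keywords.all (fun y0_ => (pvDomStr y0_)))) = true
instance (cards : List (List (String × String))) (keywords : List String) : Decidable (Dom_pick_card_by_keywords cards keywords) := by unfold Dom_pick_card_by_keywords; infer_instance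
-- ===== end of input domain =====

-- B replaces A's sort-by-score-then-take-first by a single running-minimum pass (first card with the
-- smallest score wins), with the score computed by a find-first instead of a helper loop. (alternative)

-- ===== PORT A =====
-- A's inner helper `score`: for idx, kw in enumerate(keywords): if kw and kw in text: return idx; return 999
def pvScoreALoop (text : String) : List (Int × String) → Int
  | [] => 999
  | (idx, kw) :: rest => if (kw != "") && PySem.Str.isIn kw text then idx else pvScoreALoop text rest

def pvScoreA (keywords : List String) (card : List (String × String)) : Int :=
  pvScoreALoop (PySem.Dict.getD ⟨card⟩ "name" "") (PySem.List.enumerate keywords)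

def pick_card_by_keywords (cards : List (List (String × String))) (keywords : List String) : Option (List (String × String)) :=
  if cards = [] then none
  else PySem.List.pyGet? (PySem.List.sorted cards (pvScoreA keywords)) 0

-- ===== PORT B =====
-- B's inline generator: next((i for i, kw in enumerate(keywords) if kw and kw in name), 999)
def pvScoreB (keywords : List String) (text : String) : Int :=
  (((PySem.List.enumerate keywords).find? (fun p => (p.2 != "") && PySem.Str.isIn p.2 text)).map Prod.fst).getD 999

def pick_card_by_keywords_alt (cards : List (List (String × String))) (keywords : List String) : Option (List (String × String)) :=
  (cards.foldl (fun best card =>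
      let s := pvScoreB keywords (PySem.Dict.getD ⟨card⟩ "name" "")
      match best with
      | none => some (card, s)
      | some (b, bs) => if s < bs then some (card, s) else some (b, bs)) none).map Prod.fst

-- ===== PRECONDITION & SPEC =====
def Spec_pick_card_by_keywords (cards : List (List (String × String))) (keywords : List String) (out : Option (List (String × String))) : Prop := out = pick_card_by_keywords_alt cards keywords
instance (cards : List (List (String × String))) (keywords : List String) (out : Option (List (String × String))) : Decidable (Spec_pick_card_by_keywords cards keywords out) := by unfold Spec_pick_card_by_keywords; infer_instance

-- ===== CLAIM (what is proved, stated in full; the proofs are below) =====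
def Claim_equal_pick_card_by_keywords : Prop := ∀ (cards : List (List (String × String))) (keywords : List String), Dom_pick_card_by_keywords cards keywords → Spec_pick_card_by_keywords cards keywords (pick_card_by_keywords cards keywords)

-- ===== LEMMAS AND PROOFS =====

-- the two score computations agree
theorem scoreA_eq_scoreB (text : String) (ps : List (Int × String)) :
    pvScoreALoop text ps = (((ps.find? (fun p => (p.2 != "") && PySem.Str.isIn p.2 text)).map Prod.fst).getD 999) := by
  induction ps with
  | nil => rfl
  | cons p rest ih =>
    obtain ⟨idx, kw⟩ := p
    by_cases hk : kw = "" <;> by_cases hi : PySem.Chars.isIn kw.toList text.toList = true <;>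
      simp [pvScoreALoop, hk, hi, ih]

-- the A-side min step (Python `min` semantics: first minimal element wins)
def pvMinStep (key : List (String × String) → Int) (m : Option (List (String × String))) (x : List (String × String)) : Option (List (String × String)) :=
  match m with
  | none => some x
  | some m => if key x < key m then some x else some m

theorem head?_insertBy {α : Type} (bef : α → α → Bool) (x : α) (ys : List α) :
    (PySem.List.insertBy bef x ys).head? = some (match ys with | [] => x | y :: _ => if bef x y then x else y) := by
  cases ys with
  | nil => rfl
  | cons y t =>
    by_cases h : bef x y = true <;> simp [PySem.List.insertBy, h]

-- head of the insertion-sort fold IS the running-minimum fold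
theorem head?_foldl_insertBy (key : List (String × String) → Int)
    (xs : List (List (String × String))) (acc : List (List (String × String))) :
    (xs.foldl (fun a x => PySem.List.insertBy (fun a b => decide (key a < key b)) x a) acc).head?
      = xs.foldl (pvMinStep key) acc.head? := by
  induction xs generalizing acc with
  | nil => rfl
  | cons x rest ih =>
    rw [List.foldl_cons, List.foldl_cons, ih]
    congr 1
    rw [head?_insertBy]
    cases acc with
    | nil => rfl
    | cons y t =>
      simp only [pvMinStep, List.head?_cons]
      by_cases h : key x < key y <;> simp [h]

theorem head?_sorted (key : List (String × String) → Int) (xs : List (List (String × String))) :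
    (PySem.List.sorted xs key).head? = xs.foldl (pvMinStep key) none := by
  rw [PySem.List.sorted_eq_foldl_insertBy, head?_foldl_insertBy]
  rfl

-- B's pair-carrying fold projects to the min fold
theorem foldB_eq_minFold (key : List (String × String) → Int)
    (xs : List (List (String × String))) (m : Option (List (String × String))) :
    xs.foldl (fun best card =>
        let s := key card
        match best with
        | none => some (card, s)
        | some (b, bs) => if s < bs then some (card, s) else some (b, bs))
      (m.map (fun b => (b, key b)))
      = (xs.foldl (pvMinStep key) m).map (fun b => (b, key b)) := by
  induction xs generalizing m with
  | nil => rfl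
  | cons x rest ih =>
    rw [List.foldl_cons, List.foldl_cons]
    cases m with
    | none => exact ih (some x)
    | some b =>
      simp only [Option.map_some, pvMinStep]
      by_cases h : key x < key b
      · simpa [h] using ih (some x)
      · simpa [h] using ih (some b)

-- ===== VERDICT (by name: the statement is the Claim_ definition above) =====
theorem pick_card_by_keywords_spec : Claim_equal_pick_card_by_keywords := by
  intro cards keywords _
  unfold Spec_pick_card_by_keywords pick_card_by_keywords pick_card_by_keywords_alt
  have hkey : ∀ card, pvScoreB keywords (PySem.Dict.getD ⟨card⟩ "name" "") = pvScoreA keywords card := by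
    intro card
    rw [pvScoreA, scoreA_eq_scoreB, pvScoreB]
  have hB : (cards.foldl (fun best card =>
      let s := pvScoreB keywords (PySem.Dict.getD ⟨card⟩ "name" "")
      match best with
      | none => some (card, s)
      | some (b, bs) => if s < bs then some (card, s) else some (b, bs)) none).map Prod.fst
      = cards.foldl (pvMinStep (pvScoreA keywords)) none := by
    have : (cards.foldl (fun best card =>
        let s := pvScoreA keywords card
        match best with
        | none => some (card, s)
        | some (b, bs) => if s < bs then some (card, s) else some (b, bs))
        ((none : Option (List (String × String))).map (fun b => (b, pvScoreA keywords b))))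
        = (cards.foldl (pvMinStep (pvScoreA keywords)) none).map (fun b => (b, pvScoreA keywords b)) :=
      foldB_eq_minFold (pvScoreA keywords) cards none
    simp only [Option.map_none] at this
    simp only [hkey, this, Option.map_map]
    cases cards.foldl (pvMinStep (pvScoreA keywords)) none <;> rfl
  rw [hB]
  by_cases hc : cards = []
  · subst hc; rfl
  · simp only [hc, if_false]
    have hs : PySem.List.sorted cards (pvScoreA keywords) ≠ [] := by
      simpa [PySem.List.sorted_eq_nil_iff] using hc
    rw [← head?_sorted]
    cases h : PySem.List.sorted cards (pvScoreA keywords) with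
    | nil => exact absurd h hs
    | cons y t => simp [PySem.List.pyGet?, PySem.List.pyIdx?]
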